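-- pv_equiv track=rewrite | github.com/zouharvi/ptakopet | meta/study/log_processing/segments.py | firstViableSrc
-- ===== SOURCE A (Python) =====
-- def prefixMap(logs, prefix, func=lambda x: x):
--     return list(map(func, filter(lambda x: x[1] == prefix, logs)))
--
-- def firstViableSrc(segment):
--     srcs = prefixMap(segment, 'TRANSLATE1', lambda x: x[3])
--     if len(srcs) == 0:
--         return None
--     longest = sorted(srcs, key=lambda x: len(x), reverse=True)
--
--     for src in longest:
--         if len(src) == 0:
--             return None
--         if src == segment[-1][4]:
--             continue
--         if src[-1] in ".?" or (len(src) > 1 and src[-2] in ".?"):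
--             return src
--     return None
-- ===== SOURCE B (Python) =====
-- def firstViableSrc(segment):
--     best = None
--     for row in segment:
--         if row[1] != 'TRANSLATE1':
--             continue
--         s = row[3]
--         if (s and s != segment[-1][4]
--                 and (s[-1] in '.?' or (len(s) > 1 and s[-2] in '.?'))
--                 and (best is None or len(best) < len(s))):
--             best = s
--     return best
-- ===== Notes on version B (the rewrite author's own statement) =====
-- stated objective: alternative
-- what changed: Replaces A's sort-then-scan (stable descending sort by length, then a linear scan with early returns) by a single left fold over the rows that keeps the best viable source so far, replacing it only on strictly greater length so the earliest longest viable source wins exactly as in A.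
import Mathlib
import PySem

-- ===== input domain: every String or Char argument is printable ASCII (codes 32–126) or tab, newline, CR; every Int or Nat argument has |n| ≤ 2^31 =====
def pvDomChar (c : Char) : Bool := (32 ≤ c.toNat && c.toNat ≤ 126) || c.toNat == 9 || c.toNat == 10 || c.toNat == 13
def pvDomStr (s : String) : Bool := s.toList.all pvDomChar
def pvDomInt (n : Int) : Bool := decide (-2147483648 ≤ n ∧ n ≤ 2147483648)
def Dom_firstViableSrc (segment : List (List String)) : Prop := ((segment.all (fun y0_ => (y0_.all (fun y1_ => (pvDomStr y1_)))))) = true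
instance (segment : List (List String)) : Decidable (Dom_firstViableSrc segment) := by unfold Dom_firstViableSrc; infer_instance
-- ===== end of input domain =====

-- B replaces A's sort-then-scan by a single left fold keeping the best viable candidate so far
-- (strictly-longer replaces, so the first longest viable wins, matching A's stable sort tie-break).

-- shared indexing helper: xs[i] under Pre_ (in range there); default "" outside Pre_
def pvGetS (xs : List String) (i : Int) : String := (PySem.List.pyGet? xs i).getD ""

-- ===== PORT A =====
-- src[-1] in ".?" or (len(src) > 1 and src[-2] in ".?")
def pvPunct (s : String) : Bool :=
  ".?".toList.contains ((PySem.Str.pyGet? s (-1)).getD ' ') ||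
  (decide ((1 : Int) < PySem.Str.len s) && ".?".toList.contains ((PySem.Str.pyGet? s (-2)).getD ' '))

-- A's for-loop over the sorted list (last = segment[-1][4])
def pvLoopA (last : String) : List String → Option String
  | [] => none
  | s :: rest =>
    if PySem.Str.len s = 0 then none
    else if s == last then pvLoopA last rest
    else if pvPunct s then some s
    else pvLoopA last rest

def firstViableSrc (segment : List (List String)) : Option String :=
  let srcs := (segment.filter (fun x => pvGetS x 1 == "TRANSLATE1")).map (fun x => pvGetS x 3)
  if srcs.length = 0 then none
  else
    pvLoopA (pvGetS ((PySem.List.pyGet? segment (-1)).getD []) 4)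
      (PySem.List.sorted srcs (fun s => PySem.Str.len s) true)

-- ===== PORT B =====
-- the viability test of Source B's loop body: s and s != last and (punctuation test)
def pvViable (last s : String) : Bool := !(s == "") && !(s == last) && pvPunct s

-- best is None or len(best) < len(s)
def pvBeats (best : Option String) (s : String) : Bool :=
  match best with
  | none => true
  | some b => decide (PySem.Str.len b < PySem.Str.len s)

-- one iteration of Source B's loop for a TRANSLATE1 row with source s
def pvStep (last : String) (best : Option String) (s : String) : Option String :=
  if pvViable last s && pvBeats best s then some s else best

def firstViableSrc_alt (segment : List (List String)) : Option String :=
  let last := pvGetS ((PySem.List.pyGet? segment (-1)).getD []) 4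
  segment.foldl
    (fun best row =>
      if pvGetS row 1 == "TRANSLATE1" then pvStep last best (pvGetS row 3) else best)
    none

-- ===== PRECONDITION & SPEC =====
-- Pre_ excludes exactly the inputs where A raises IndexError: a row shorter than 2, a
-- TRANSLATE1 row shorter than 4, or a last row shorter than 5 while some TRANSLATE1
-- row carries a non-empty source (only then does A evaluate segment[-1][4]).
def Pre_firstViableSrc (segment : List (List String)) : Prop :=
  (∀ row ∈ segment, 2 ≤ row.length) ∧
  (∀ row ∈ segment, row.getD 1 "" = "TRANSLATE1" → 4 ≤ row.length) ∧
  ((∃ row ∈ segment, row.getD 1 "" = "TRANSLATE1" ∧ row.getD 3 "" ≠ "") →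
    5 ≤ (segment.getLast?.getD []).length)

instance (segment : List (List String)) : Decidable (Pre_firstViableSrc segment) := by
  unfold Pre_firstViableSrc; infer_instance

def pvWitness_firstViableSrc : List (List String) :=
  [["a", "TRANSLATE1", "x", "hi.", "tail"]]

def Spec_firstViableSrc (segment : List (List String)) (out : Option String) : Prop :=
  out = firstViableSrc_alt segment

instance (segment : List (List String)) (out : Option String) :
    Decidable (Spec_firstViableSrc segment out) := by
  unfold Spec_firstViableSrc; infer_instance

-- ===== CLAIM (what is proved, stated in full; the proofs are below) =====
def Claim_equal_firstViableSrc : Prop :=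
  ∀ (segment : List (List String)), Dom_firstViableSrc segment →
    Pre_firstViableSrc segment → Spec_firstViableSrc segment (firstViableSrc segment)

-- ===== LEMMAS AND PROOFS =====

-- a string of length 0 is ""
theorem pv_len_zero {s : String} (h : PySem.Str.len s = 0) : s = "" := by
  have : s.toList.length = 0 := by
    have := PySem.Str.len_eq s; omega
  exact String.toList_eq_nil_iff.mp (List.length_eq_zero_iff.mp this)

-- A's early-return loop on a length-descending list is find? of the viability test
theorem pvLoopA_eq_find (last : String) :
    ∀ L : List String,
      L.Pairwise (fun a b => PySem.Str.len b ≤ PySem.Str.len a) →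
      pvLoopA last L = L.find? (pvViable last) := by
  intro L hL
  induction L with
  | nil => rfl
  | cons s rest ih =>
    rcases List.pairwise_cons.mp hL with ⟨hhead, htail⟩
    by_cases h0 : PySem.Str.len s = 0
    · have hs : s = "" := pv_len_zero h0
      have hnone : ∀ y ∈ s :: rest, ¬ pvViable last y = true := by
        intro y hy
        rcases List.mem_cons.mp hy with rfl | hy
        · simp [hs, pvViable]
        · have hy0 : PySem.Str.len y = 0 := by
            have h1 := hhead y hy
            have h2 := PySem.Str.len_eq y
            have h3 := PySem.Str.len_eq s
            omega
          have : y = "" := pv_len_zero hy0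
          simp [this, pvViable]
      rw [List.find?_eq_none.mpr hnone]
      subst hs
      simp [pvLoopA, PySem.Str.len]
    · have hsne : ¬ (s == "") = true := by
        intro hb
        exact h0 (by simp [beq_iff_eq] at hb; simp [hb, PySem.Str.len_eq])
      by_cases hlast : (s == last) = true
      · have : pvViable last s = false := by simp [pvViable, hlast]
        simp only [pvLoopA, if_neg h0, if_pos hlast, List.find?, this]
        exact ih htail
      · have hs1 : (s == "") = false := Bool.eq_false_iff.mpr hsne
        have hs2 : (s == last) = false := Bool.eq_false_iff.mpr hlast
        by_cases hp : pvPunct s = true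
        · have hv : pvViable last s = true := by
            simp only [pvViable]; rw [hs1, hs2, hp]; rfl
          rw [List.find?_cons_of_pos hv]
          simp only [pvLoopA, if_neg h0, if_neg hlast, if_pos hp]
        · have hp' : pvPunct s = false := Bool.eq_false_iff.mpr hp
          have hv : pvViable last s = false := by
            simp only [pvViable]; rw [hp']; simp
          simp only [pvLoopA, if_neg h0, if_neg hlast, if_neg hp, List.find?, hv]
          exact ih htail

-- insertBy splits the list at the first element satisfying `before x ·`
theorem pv_insertBy_split (before : String → String → Bool) (x : String) :
    ∀ L : List String,
      PySem.List.insertBy before x L =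
        L.takeWhile (fun y => !before x y) ++ x :: L.dropWhile (fun y => !before x y) := by
  intro L
  induction L with
  | nil => rfl
  | cons y ys ih =>
    by_cases h : before x y = true
    · simp [PySem.List.insertBy, h, List.takeWhile, List.dropWhile]
    · simp only [Bool.not_eq_true] at h
      simp [PySem.List.insertBy, h, List.takeWhile, List.dropWhile, ih]

-- every element dropped by the takeWhile has key < key x (descending list)
theorem pv_dropWhile_lt (x : String) :
    ∀ L : List String,
      L.Pairwise (fun a b => PySem.Str.len b ≤ PySem.Str.len a) →
      ∀ y ∈ L.dropWhile (fun y => !(decide (PySem.Str.len y < PySem.Str.len x))),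
        PySem.Str.len y < PySem.Str.len x := by
  intro L hL
  induction L with
  | nil => intro y hy; simp [List.dropWhile] at hy
  | cons a t ih =>
    rcases List.pairwise_cons.mp hL with ⟨hhead, htail⟩
    by_cases h : PySem.Str.len a < PySem.Str.len x
    · intro y hy
      simp only [List.dropWhile, h, decide_true, Bool.not_true] at hy
      rcases List.mem_cons.mp hy with rfl | hy
      · exact h
      · exact lt_of_le_of_lt (hhead y hy) h
    · intro y hy
      simp only [List.dropWhile, h, decide_false, Bool.not_false] at hy
      exact ih htail y hy

-- main lemma: find? over the descending stable sort = the best-so-far fold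
theorem pv_find_sorted_eq_fold (last : String) :
    ∀ srcs : List String,
      (PySem.List.sorted srcs (fun s => PySem.Str.len s) true).find? (pvViable last) =
        srcs.foldl (pvStep last) none := by
  intro srcs
  induction srcs using List.reverseRecOn with
  | nil => rfl
  | append_singleton srcs x ih =>
    have hsorted :
        PySem.List.sorted (srcs ++ [x]) (fun s => PySem.Str.len s) true =
          PySem.List.insertBy (fun a b => decide (PySem.Str.len b < PySem.Str.len a)) x
            (PySem.List.sorted srcs (fun s => PySem.Str.len s) true) := by
      rw [PySem.List.sorted_rev_eq_foldl_insertBy, PySem.List.sorted_rev_eq_foldl_insertBy,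
        List.foldl_append]
      rfl
    set L := PySem.List.sorted srcs (fun s => PySem.Str.len s) true with hLdef
    have hLpair : L.Pairwise (fun a b => PySem.Str.len b ≤ PySem.Str.len a) :=
      PySem.List.sorted_pairwise_rev srcs (fun s => PySem.Str.len s)
    set p : String → Bool := fun y => !(decide (PySem.Str.len y < PySem.Str.len x)) with hp
    have hsplit :
        PySem.List.insertBy (fun a b => decide (PySem.Str.len b < PySem.Str.len a)) x L =
          L.takeWhile p ++ x :: L.dropWhile p :=
      pv_insertBy_split _ x L
    rw [hsorted, hsplit, List.foldl_append]
    have hLsplit : L.takeWhile p ++ L.dropWhile p = L := List.takeWhile_append_dropWhile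
    have hfindL : L.find? (pvViable last) =
        ((L.takeWhile p).find? (pvViable last)).or ((L.dropWhile p).find? (pvViable last)) := by
      conv_lhs => rw [← hLsplit]
      exact List.find?_append
    rw [List.find?_append]
    simp only [List.foldl_cons, List.foldl_nil]
    rw [← ih, hfindL]
    cases hP : (L.takeWhile p).find? (pvViable last) with
    | some m =>
      have hmem : m ∈ L.takeWhile p := List.mem_of_find?_eq_some hP
      have hkey : ¬ PySem.Str.len m < PySem.Str.len x := by
        have := List.mem_takeWhile_imp hmem
        simpa [hp] using this
      have hbeats : pvBeats (some m) x = false := decide_eq_false hkey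
      simp only [Option.some_or, pvStep, hbeats, Bool.and_false, Bool.false_eq_true, if_false]
    | none =>
      simp only [Option.none_or]
      by_cases hvx : pvViable last x = true
      · rw [List.find?_cons_of_pos hvx]
        cases hS : (L.dropWhile p).find? (pvViable last) with
        | none =>
          simp only [pvStep, pvBeats, hvx, Bool.and_true, if_pos]
        | some m =>
          have hmem : m ∈ L.dropWhile p := List.mem_of_find?_eq_some hS
          have hkey : PySem.Str.len m < PySem.Str.len x :=
            pv_dropWhile_lt x L hLpair m (by simpa [hp] using hmem)
          have hbeats : pvBeats (some m) x = true := decide_eq_true hkey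
          simp only [pvStep, hbeats, hvx, Bool.and_self, if_pos]
      · have hvx' : pvViable last x = false := Bool.eq_false_iff.mpr hvx
        rw [List.find?_cons_of_neg hvx]
        simp only [pvStep, hvx', Bool.false_and, Bool.false_eq_true, if_false]

-- B's fold over the rows equals the fold over the extracted sources
theorem pv_fold_rows_eq_fold_srcs (last : String) :
    ∀ (segment : List (List String)) (init : Option String),
      segment.foldl
        (fun best row =>
          if pvGetS row 1 == "TRANSLATE1" then pvStep last best (pvGetS row 3) else best)
        init =
      ((segment.filter (fun x => pvGetS x 1 == "TRANSLATE1")).map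
        (fun x => pvGetS x 3)).foldl (pvStep last) init := by
  intro segment
  induction segment with
  | nil => intro init; rfl
  | cons row rest ih =>
    intro init
    simp only [List.foldl_cons, List.filter_cons]
    by_cases h : (pvGetS row 1 == "TRANSLATE1") = true
    · rw [if_pos h, if_pos h]
      simp only [List.map_cons, List.foldl_cons]
      exact ih _
    · rw [if_neg h, if_neg h]
      exact ih _

-- ===== VERDICT (by name: the statement is the Claim_ definition above) =====
theorem firstViableSrc_spec : Claim_equal_firstViableSrc := by
  intro segment _ _
  unfold Spec_firstViableSrc firstViableSrc firstViableSrc_alt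
  set last := pvGetS ((PySem.List.pyGet? segment (-1)).getD []) 4 with hlast
  set srcs := (segment.filter (fun x => pvGetS x 1 == "TRANSLATE1")).map (fun x => pvGetS x 3)
    with hsrcs
  rw [pv_fold_rows_eq_fold_srcs last segment none, ← hsrcs]
  by_cases h : srcs.length = 0
  · have : srcs = [] := List.length_eq_zero_iff.mp h
    simp [this]
  · rw [if_neg h,
      pvLoopA_eq_find last _ (PySem.List.sorted_pairwise_rev srcs (fun s => PySem.Str.len s)),
      pv_find_sorted_eq_fold last srcs]
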